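-- pv_equiv track=rewrite | github.com/ChrisDelf/Tree_and_Graphs | Random_Code_Challenges/areEquallyStrong.py | areEquallyStrong
-- ===== SOURCE A (Python) =====
-- def areEquallyStrong(yourLeft, yourRight, friendsLeft, friendsRight):
--     ## going to use a dictionary
--
--     armArray = []
--
--     yourArms = {}
--     yourArms["right"] = yourRight
--     yourArms["left"] = yourLeft
--
--     friendsArms = {}
--     friendsArms["right"] = friendsRight
--     friendsArms["left"] = friendsLeft
--
--     armStrength = 0
--
--     for key in yourArms:
--         for arm in friendsArms:
--             if yourArms[key] == friendsArms[arm]: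
--                 yourArms[key] -= friendsArms[arm]
--
--     for key in yourArms:
--         armStrength += yourArms[key]
--
--     if armStrength == 0:
--         return True
--     else:
--         return False
-- ===== SOURCE B (Python) =====
-- def areEquallyStrong(yourLeft, yourRight, friendsLeft, friendsRight):
--     return sorted([yourLeft, yourRight]) == sorted([friendsLeft, friendsRight])
-- ===== Notes on version B (the rewrite author's own statement) =====
-- stated objective: idiomatic
-- what changed: Replaced the dictionaries, the nested 2x2 cancellation loop and the summing loop by a direct multiset comparison of the two strength pairs via sorted().
-- intended difference: On inputs where the two strength pairs are not equal as multisets yet the 'your' values left unmatched by either friend value sum to zero (e.g. (3,-3,1,2)), A returns True while B returns False; B's is the intended answer since the pairs are plainly not equally strong. — e.g. on areEquallyStrong(3, -3, 1, 2): A returns true, B returns false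
import Mathlib
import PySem

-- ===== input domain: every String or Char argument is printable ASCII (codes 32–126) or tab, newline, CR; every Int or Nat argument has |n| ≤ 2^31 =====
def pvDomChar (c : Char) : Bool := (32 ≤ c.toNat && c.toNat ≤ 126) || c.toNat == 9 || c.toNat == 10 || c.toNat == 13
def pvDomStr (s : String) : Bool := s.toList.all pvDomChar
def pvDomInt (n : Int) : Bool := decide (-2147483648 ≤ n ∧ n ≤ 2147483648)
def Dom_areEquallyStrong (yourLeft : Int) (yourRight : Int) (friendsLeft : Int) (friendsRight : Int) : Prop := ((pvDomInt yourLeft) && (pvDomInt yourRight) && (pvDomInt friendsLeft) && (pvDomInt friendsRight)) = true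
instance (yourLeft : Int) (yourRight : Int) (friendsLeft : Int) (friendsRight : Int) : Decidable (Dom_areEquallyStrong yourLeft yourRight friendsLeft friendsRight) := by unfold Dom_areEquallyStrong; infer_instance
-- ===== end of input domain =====

-- B compares the two strength pairs as multisets via sorted() instead of A's dictionary
-- cancellation loops (objective: idiomatic); where A's zero-sum accounting accidentally
-- reports True for unequal pairs, B returns the intended False (see D_ below).

-- ===== PORT A =====
def areEquallyStrong (yourLeft : Int) (yourRight : Int) (friendsLeft : Int) (friendsRight : Int) : Bool :=
  -- armArray = [] is dead code in A; yourArms/friendsArms built by successive insertion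
  let yourArms : PySem.Dict String Int :=
    (PySem.Dict.empty.insert "right" yourRight).insert "left" yourLeft
  let friendsArms : PySem.Dict String Int :=
    (PySem.Dict.empty.insert "right" friendsRight).insert "left" friendsLeft
  -- for key in yourArms: for arm in friendsArms: if equal, yourArms[key] -= friendsArms[arm]
  let yourArms :=
    yourArms.keys.foldl (fun d key =>
      friendsArms.keys.foldl (fun d arm =>
        if d.getD key 0 == friendsArms.getD arm 0 then
          d.modify key 0 (fun v => v - friendsArms.getD arm 0)
        else d) d) yourArms
  -- for key in yourArms: armStrength += yourArms[key]
  let armStrength := yourArms.keys.foldl (fun s key => s + yourArms.getD key 0) 0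
  if armStrength == 0 then true else false

-- ===== PORT B =====
def areEquallyStrong_alt (yourLeft : Int) (yourRight : Int) (friendsLeft : Int) (friendsRight : Int) : Bool :=
  PySem.List.sorted [yourLeft, yourRight] (fun x => x) false
    == PySem.List.sorted [friendsLeft, friendsRight] (fun x => x) false

-- ===== PRECONDITION & SPEC =====
-- On inputs where the pairs are not equal as multisets yet the 'your' values unmatched by
-- either friend value sum to zero, A returns True while B returns the intended False.
def D_areEquallyStrong (yourLeft : Int) (yourRight : Int) (friendsLeft : Int) (friendsRight : Int) : Prop :=
  ¬ ((yourLeft = friendsLeft ∧ yourRight = friendsRight) ∨ (yourLeft = friendsRight ∧ yourRight = friendsLeft)) ∧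
  (if yourRight ≠ friendsRight ∧ yourRight ≠ friendsLeft then yourRight else 0)
    + (if yourLeft ≠ friendsRight ∧ yourLeft ≠ friendsLeft then yourLeft else 0) = 0
instance (yourLeft : Int) (yourRight : Int) (friendsLeft : Int) (friendsRight : Int) : Decidable (D_areEquallyStrong yourLeft yourRight friendsLeft friendsRight) := by unfold D_areEquallyStrong; infer_instance

def Spec_areEquallyStrong (yourLeft : Int) (yourRight : Int) (friendsLeft : Int) (friendsRight : Int) (out : Bool) : Prop := ¬ D_areEquallyStrong yourLeft yourRight friendsLeft friendsRight → out = areEquallyStrong_alt yourLeft yourRight friendsLeft friendsRight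
instance (yourLeft : Int) (yourRight : Int) (friendsLeft : Int) (friendsRight : Int) (out : Bool) : Decidable (Spec_areEquallyStrong yourLeft yourRight friendsLeft friendsRight out) := by unfold Spec_areEquallyStrong; infer_instance

def pvDiffWitness_areEquallyStrong : Int × Int × Int × Int := (3, -3, 1, 2)
def pvDiffWitnessOut_areEquallyStrong : Bool × Bool := (true, false)

-- ===== CLAIM (what is proved, stated in full; the proofs are below) =====
def Claim_unchanged_areEquallyStrong : Prop := ∀ (yourLeft : Int) (yourRight : Int) (friendsLeft : Int) (friendsRight : Int), Dom_areEquallyStrong yourLeft yourRight friendsLeft friendsRight → Spec_areEquallyStrong yourLeft yourRight friendsLeft friendsRight (areEquallyStrong yourLeft yourRight friendsLeft friendsRight)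
def Claim_changed_areEquallyStrong : Prop := Dom_areEquallyStrong (pvDiffWitness_areEquallyStrong.1) (pvDiffWitness_areEquallyStrong.2.1) (pvDiffWitness_areEquallyStrong.2.2.1) (pvDiffWitness_areEquallyStrong.2.2.2) ∧ D_areEquallyStrong (pvDiffWitness_areEquallyStrong.1) (pvDiffWitness_areEquallyStrong.2.1) (pvDiffWitness_areEquallyStrong.2.2.1) (pvDiffWitness_areEquallyStrong.2.2.2) ∧ areEquallyStrong (pvDiffWitness_areEquallyStrong.1) (pvDiffWitness_areEquallyStrong.2.1) (pvDiffWitness_areEquallyStrong.2.2.1) (pvDiffWitness_areEquallyStrong.2.2.2) = pvDiffWitnessOut_areEquallyStrong.1 ∧ areEquallyStrong_alt (pvDiffWitness_areEquallyStrong.1) (pvDiffWitness_areEquallyStrong.2.1) (pvDiffWitness_areEquallyStrong.2.2.1) (pvDiffWitness_areEquallyStrong.2.2.2) = pvDiffWitnessOut_areEquallyStrong.2 ∧ pvDiffWitnessOut_areEquallyStrong.1 ≠ pvDiffWitnessOut_areEquallyStrong.2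
def Claim_exact_areEquallyStrong : Prop := ∀ (yourLeft : Int) (yourRight : Int) (friendsLeft : Int) (friendsRight : Int), Dom_areEquallyStrong yourLeft yourRight friendsLeft friendsRight → D_areEquallyStrong yourLeft yourRight friendsLeft friendsRight → areEquallyStrong yourLeft yourRight friendsLeft friendsRight ≠ areEquallyStrong_alt yourLeft yourRight friendsLeft friendsRight

-- ===== LEMMAS AND PROOFS =====
-- proof-only helper: one body of A's inner loop (if equal, subtract), named for rewriting
def pvStep (key : String) (c : Int) (d : PySem.Dict String Int) : PySem.Dict String Int :=
  if d.getD key 0 == c then d.modify key 0 (fun v => v - c) else d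

theorem pvStep_eq (key : String) (c : Int) (d : PySem.Dict String Int) :
    (if d.getD key 0 == c then d.modify key 0 (fun v => v - c) else d) = pvStep key c d := rfl

theorem pvStep_keys (key : String) (c : Int) (d : PySem.Dict String Int)
    (h : key ∈ d.keys) : (pvStep key c d).keys = d.keys := by
  unfold pvStep; split
  · rw [PySem.Dict.keys_modify, PySem.Dict.keys_insert_of_contains]
    exact (PySem.Dict.contains_iff_mem_keys _ _).2 h
  · rfl

theorem pvStep_getD_self (key : String) (c : Int) (d : PySem.Dict String Int) :
    (pvStep key c d).getD key 0 = if d.getD key 0 = c then 0 else d.getD key 0 := by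
  unfold pvStep
  by_cases h : d.getD key 0 = c
  · simp [h, PySem.Dict.getD_modify_self]
  · simp [h]

theorem pvStep_getD_ne (key : String) (c : Int) (d : PySem.Dict String Int)
    (k' : String) (h : k' ≠ key) :
    (pvStep key c d).getD k' 0 = d.getD k' 0 := by
  unfold pvStep
  by_cases hc : d.getD key 0 = c
  · simp [hc, PySem.Dict.getD_modify, h]
  · simp [hc]

-- characterisation of A: the residual sum of the 'your' values unmatched by either friend value
theorem areEquallyStrong_eq_residual (yL yR fL fR : Int) :
    areEquallyStrong yL yR fL fR
      = decide ((if yR ≠ fR ∧ yR ≠ fL then yR else 0)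
          + (if yL ≠ fR ∧ yL ≠ fL then yL else 0) = 0) := by
  unfold areEquallyStrong
  have hy : (PySem.Dict.empty.insert "right" yR).insert "left" yL
      = PySem.Dict.mk [("right", yR), ("left", yL)] := rfl
  have hf : (PySem.Dict.empty.insert "right" fR).insert "left" fL
      = PySem.Dict.mk [("right", fR), ("left", fL)] := rfl
  simp only [hy, hf]
  have hgr : (PySem.Dict.mk [("right", fR), ("left", fL)]).getD "right" 0 = fR := rfl
  have hgl : (PySem.Dict.mk [("right", fR), ("left", fL)]).getD "left" 0 = fL := rfl
  simp only [PySem.Dict.keys_mk, List.map_cons, List.map_nil, List.foldl_cons, List.foldl_nil,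
    hgr, hgl, pvStep_eq]
  have hne1 : ∀ (c : Int) (d : PySem.Dict String Int),
      (pvStep "left" c d).getD "right" 0 = d.getD "right" 0 :=
    fun c d => pvStep_getD_ne _ c d _ (by decide)
  have hne2 : ∀ (c : Int) (d : PySem.Dict String Int),
      (pvStep "right" c d).getD "left" 0 = d.getD "left" 0 :=
    fun c d => pvStep_getD_ne _ c d _ (by decide)
  have hd0r : (PySem.Dict.mk [("right", yR), ("left", yL)]).getD "right" 0 = yR := rfl
  have hd0l : (PySem.Dict.mk [("right", yR), ("left", yL)]).getD "left" 0 = yL := rfl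
  have hk0 : (PySem.Dict.mk [("right", yR), ("left", yL)]).keys = ["right", "left"] := rfl
  have hk1 : (pvStep "right" fR (PySem.Dict.mk [("right", yR), ("left", yL)])).keys
      = ["right", "left"] := by
    rw [pvStep_keys _ _ _ (by rw [hk0]; decide), hk0]
  have hk2 : (pvStep "right" fL (pvStep "right" fR
      (PySem.Dict.mk [("right", yR), ("left", yL)]))).keys = ["right", "left"] := by
    rw [pvStep_keys _ _ _ (by rw [hk1]; decide), hk1]
  have hk3 : (pvStep "left" fR (pvStep "right" fL (pvStep "right" fR
      (PySem.Dict.mk [("right", yR), ("left", yL)])))).keys = ["right", "left"] := by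
    rw [pvStep_keys _ _ _ (by rw [hk2]; decide), hk2]
  have hk4 : (pvStep "left" fL (pvStep "left" fR (pvStep "right" fL (pvStep "right" fR
      (PySem.Dict.mk [("right", yR), ("left", yL)]))))).keys = ["right", "left"] := by
    rw [pvStep_keys _ _ _ (by rw [hk3]; decide), hk3]
  simp only [hk4, List.foldl_cons, List.foldl_nil, hne1, hne2, pvStep_getD_self, hd0r, hd0l]
  split_ifs <;> simp_all <;> omega

-- characterisation of B: multiset equality of the two pairs
theorem areEquallyStrong_alt_eq_multiset (yL yR fL fR : Int) :
    areEquallyStrong_alt yL yR fL fR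
      = decide ((yL = fL ∧ yR = fR) ∨ (yL = fR ∧ yR = fL)) := by
  have hbeq : ∀ l1 l2 : List Int, (l1 == l2) = decide (l1 = l2) := fun l1 l2 => by
    by_cases h : l1 = l2 <;> simp [h]
  unfold areEquallyStrong_alt
  simp only [PySem.List.sorted]
  rw [hbeq, decide_eq_decide]
  by_cases h1 : yR < yL <;> by_cases h2 : fR < fL <;>
    simp [PySem.List.insertBy, h1, h2, List.cons.injEq] <;> omega

-- ===== VERDICT (by name: the statement is the Claim_ definition above) =====
theorem areEquallyStrong_spec : Claim_unchanged_areEquallyStrong := by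
  intro yL yR fL fR _ hnd
  unfold D_areEquallyStrong at hnd
  rw [areEquallyStrong_eq_residual, areEquallyStrong_alt_eq_multiset]
  by_cases hm : (yL = fL ∧ yR = fR) ∨ (yL = fR ∧ yR = fL)
  · simp only [hm, decide_true]
    rcases hm with ⟨h1, h2⟩ | ⟨h1, h2⟩ <;> subst h1 <;> subst h2 <;> simp
  · have hr : ¬ ((if yR ≠ fR ∧ yR ≠ fL then yR else 0)
        + (if yL ≠ fR ∧ yL ≠ fL then yL else 0) = 0) := fun h => hnd ⟨hm, h⟩
    simp [hm, hr]

theorem areEquallyStrong_changed : Claim_changed_areEquallyStrong := by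
  unfold Claim_changed_areEquallyStrong; decide

theorem areEquallyStrong_tight : Claim_exact_areEquallyStrong := by
  intro yL yR fL fR _ hd
  unfold D_areEquallyStrong at hd
  rw [areEquallyStrong_eq_residual, areEquallyStrong_alt_eq_multiset]
  simp [hd.2, hd.1]
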